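-- pv_equiv track=rewrite | github.com/fraxinusea/Python | snaps.py | split_lines_on_spaces
-- ===== SOURCE A (Python) =====
-- def split_lines_on_spaces(text):
--     '''
--     returns a list of words which have been
--     extracted from the text.
--     Spaces on the ends of words are
--     preserved
--     '''
--     result = []
--     got_space = False
--     word = ''
--     for ch in text:
--         if ch == ' ':
--             got_space = True
--             word = word + ch
--         else:
--             if got_space:
--                 # first character of next word
--                 result.append(word)
--                 word=ch
--                 got_space=False
--             else:
--                 word = word + ch
--
--     result.append(word)
--
--     return result
-- ===== SOURCE B (Python) =====
-- def split_lines_on_spaces(text):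
--     '''Same words-with-trailing-spaces split, built back-to-front:
--     scan the text right-to-left, prepending each character to the first
--     word, and open a new word when a space meets a non-space start.'''
--     words = ['']
--     for ch in reversed(text):
--         if ch == ' ' and words[0] and not words[0].startswith(' '):
--             words.insert(0, ch)
--         else:
--             words[0] = ch + words[0]
--     return words
-- ===== Notes on version B (the rewrite author's own statement) =====
-- stated objective: alternative
-- what changed: Replaces the left-to-right got_space/word accumulator state machine (with a final flush append) by a right-to-left single pass that builds the word list back-to-front, prepending each character and opening a new word where a space meets a non-space word start; no flag, no flush.
import Mathlib
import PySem

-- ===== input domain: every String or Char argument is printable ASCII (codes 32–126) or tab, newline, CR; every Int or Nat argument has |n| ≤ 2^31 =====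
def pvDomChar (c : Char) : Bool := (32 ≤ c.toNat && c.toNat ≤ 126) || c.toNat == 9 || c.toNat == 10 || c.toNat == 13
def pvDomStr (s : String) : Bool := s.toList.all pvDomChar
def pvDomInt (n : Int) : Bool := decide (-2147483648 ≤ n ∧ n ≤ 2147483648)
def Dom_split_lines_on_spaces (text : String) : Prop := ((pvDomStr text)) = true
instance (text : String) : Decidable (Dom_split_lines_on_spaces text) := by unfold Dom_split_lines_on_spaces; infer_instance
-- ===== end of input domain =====

-- B builds the word list back-to-front in one right-to-left pass, replacing A's got_space state machine; objective: alternative (same cost).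

-- ===== PORT A =====
-- words are carried as List Char and converted with String.ofList at the end (exact for Python string concatenation)
def stepA (st : List (List Char) × Bool × List Char) (ch : Char) : List (List Char) × Bool × List Char :=
  let (result, got_space, word) := st
  if ch = ' ' then (result, true, word ++ [ch])
  else if got_space then (result ++ [word], false, [ch])
  else (result, got_space, word ++ [ch])

def split_lines_on_spaces (text : String) : List String :=
  ((text.toList.foldl stepA ([], false, [])).1 ++ [(text.toList.foldl stepA ([], false, [])).2.2]).map String.ofList

-- ===== PORT B =====
-- one reversed-iteration step: prepend ch to the first word, or open a new word [' ']
def bstep (ch : Char) (words : List (List Char)) : List (List Char) :=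
  match words with
  | [] => [[ch]]            -- unreachable: words starts nonempty and every step keeps it nonempty
  | w :: ws => if ch = ' ' ∧ w ≠ [] ∧ w.head? ≠ some ' ' then [ch] :: w :: ws else (ch :: w) :: ws

def split_lines_on_spaces_alt (text : String) : List String :=
  (text.toList.foldr bstep [[]]).map String.ofList

-- ===== PRECONDITION & SPEC =====
def Spec_split_lines_on_spaces (text : String) (out : List String) : Prop := out = split_lines_on_spaces_alt text
instance (text : String) (out : List String) : Decidable (Spec_split_lines_on_spaces text out) := by unfold Spec_split_lines_on_spaces; infer_instance

-- ===== CLAIM (what is proved, stated in full; the proofs are below) =====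
def Claim_equal_split_lines_on_spaces : Prop := ∀ (text : String), Dom_split_lines_on_spaces text → Spec_split_lines_on_spaces text (split_lines_on_spaces text)

-- ===== LEMMAS AND PROOFS =====

-- A's loop rewritten as a structural recursion (result accumulator factored out)
def goA (gs : Bool) (w : List Char) : List Char → List (List Char)
  | [] => [w]
  | c :: cs =>
      if c = ' ' then goA true (w ++ [c]) cs
      else if gs then w :: goA false [c] cs
      else goA false (w ++ [c]) cs

-- does the char after the current position start a word (non-space)?
def headNS : List Char → Bool
  | [] => false
  | c :: _ => c ≠ ' '

lemma foldl_stepA (cs : List Char) : ∀ (res : List (List Char)) (gs : Bool) (w : List Char),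
    (cs.foldl stepA (res, gs, w)).1 ++ [(cs.foldl stepA (res, gs, w)).2.2]
      = res ++ goA gs w cs := by
  induction cs with
  | nil => intro res gs w; simp [goA]
  | cons c cs ih =>
      intro res gs w
      by_cases hc : c = ' '
      · simp [stepA, goA, hc, ih]
      · cases gs <;> simp [stepA, goA, hc, ih]

lemma bfold_head (cs : List Char) :
    ∃ v vs, cs.foldr bstep [[]] = v :: vs ∧ v.head? = cs.head? := by
  induction cs with
  | nil => exact ⟨[], [], rfl, rfl⟩
  | cons c cs ih =>
      obtain ⟨v, vs, hv, _⟩ := ih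
      by_cases h : c = ' ' ∧ v ≠ [] ∧ v.head? ≠ some ' '
      · exact ⟨[c], v :: vs, by simp [bstep, hv, h], rfl⟩
      · exact ⟨c :: v, vs, by simp [bstep, hv, h], rfl⟩

lemma goA_bfold (cs : List Char) : ∀ (gs : Bool) (w : List Char),
    goA gs w cs
      = (match cs.foldr bstep [[]] with
         | [] => [w]
         | v :: vs => if gs && headNS cs then w :: v :: vs else (w ++ v) :: vs) := by
  induction cs with
  | nil => intro gs w; simp [goA, headNS]
  | cons c cs ih =>
      intro gs w
      obtain ⟨v, vs, hv, hhd⟩ := bfold_head cs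
      have hns : (v ≠ [] ∧ v.head? ≠ some ' ') ↔ headNS cs = true := by
        cases cs with
        | nil =>
            cases v with
            | nil => simp [headNS]
            | cons a t => simp at hhd
        | cons c' cs' =>
            cases v with
            | nil => simp at hhd
            | cons a t =>
                have ha : a = c' := by simpa using hhd
                subst ha
                simp [headNS]
      by_cases hc : c = ' '
      · -- step consumes a space: gs becomes true
        subst hc
        have h2 : headNS (' ' :: cs) = false := by simp [headNS]
        rw [goA, if_pos rfl, ih true (w ++ [' '])]
        by_cases hcut : headNS cs = true
        · have hs : v ≠ [] ∧ v.head? ≠ some ' ' := hns.mpr hcut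
          simp [List.foldr, hv, bstep, hs, hcut, h2]
        · have hs' : ¬ (v ≠ [] ∧ v.head? ≠ some ' ') := fun h => hcut (hns.mp h)
          rw [Bool.not_eq_true] at hcut
          simp [List.foldr, hv, bstep, hs', hcut, h2]
      · -- non-space step
        have hstep : ¬ (c = ' ' ∧ v ≠ [] ∧ v.head? ≠ some ' ') := fun h => hc h.1
        have h2 : headNS (c :: cs) = true := by simp [headNS, hc]
        cases gs with
        | true =>
            rw [goA, if_neg hc, if_pos rfl, ih false [c]]
            simp [List.foldr, hv, bstep, hstep, h2]
        | false =>
            rw [goA, if_neg hc, if_neg (by simp), ih false (w ++ [c])]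
            simp [List.foldr, hv, bstep, hstep, h2]

-- ===== VERDICT (by name: the statement is the Claim_ definition above) =====
theorem split_lines_on_spaces_spec : Claim_equal_split_lines_on_spaces := by
  intro text _
  unfold Spec_split_lines_on_spaces split_lines_on_spaces split_lines_on_spaces_alt
  obtain ⟨v, vs, hv, _⟩ := bfold_head text.toList
  rw [foldl_stepA, goA_bfold, hv]
  simp
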